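-- pv_equiv track=rewrite | github.com/MacJim/Python-Utility-Scripts | brackets_square_curly_conversion.py | convert_brackets
-- ===== SOURCE A (Python) =====
-- def convert_brackets(s: str) -> str:
--     # MARK: Verify that `s` is valid
--     left_square_brackets_count = 0
--     right_square_brackets_count = 0
--     right_curly_brackets_count = 0
--     left_curly_brackets_count = 0
--
--     for i, c in enumerate(s):
--         if c == '[':
--             left_square_brackets_count += 1
--         elif c == ']':
--             right_square_brackets_count += 1
--             if right_square_brackets_count > left_square_brackets_count:
--                 # Error case 1: More right brackets than left brackets.
--                 raise ValueError(f"More right square brackets than left brackets at index {i}.")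
--
--         elif c == '{':
--             left_curly_brackets_count += 1
--         elif c == '}':
--             right_curly_brackets_count += 1
--             if right_curly_brackets_count > left_curly_brackets_count:
--                 # Error case 1: More right brackets than left brackets.
--                 raise ValueError(f"More right curly brackets than left brackets at index {i}.")
--
--     # Error case 2: Both square and curly brackets.
--     square_brackets_found = (left_square_brackets_count > 0) or (right_square_brackets_count > 0)
--     curly_brackets_found = (left_curly_brackets_count > 0) or (right_curly_brackets_count > 0)
--     if square_brackets_found and curly_brackets_found:
--         raise ValueError(f"\nBoth square and curly brackets found: ({left_square_brackets_count}, {right_square_brackets_count}, {left_curly_brackets_count}, {right_curly_brackets_count})")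
--
--     # Error case 3: Unbalanced brackets count.
--     if square_brackets_found:
--         if left_square_brackets_count != right_square_brackets_count:
--             raise ValueError(f"\nUnbalanced square brackets: ({left_square_brackets_count}, {right_square_brackets_count})")
--
--     if curly_brackets_found:
--         if left_curly_brackets_count != right_curly_brackets_count:
--             raise ValueError(f"\nUnbalanced curly brackets: ({left_curly_brackets_count}, {right_curly_brackets_count})")
--
--     # MARK: Change brackets
--     solution = s
--
--     if square_brackets_found:
--         solution = s.replace('[', '{')
--         solution = solution.replace(']', '}')
--
--     if curly_brackets_found:
--         solution = s.replace('{', '[')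
--         solution = solution.replace('}', ']')
--
--     return solution
-- ===== SOURCE B (Python) =====
-- def convert_brackets(s: str) -> str:
--     # Position-pairing validator: collect the index lists of each bracket kind,
--     # then a bracket family is valid iff the lists have equal length and the
--     # k-th opening bracket appears before the k-th closing bracket.
--     sq_open = [i for i, c in enumerate(s) if c == '[']
--     sq_close = [i for i, c in enumerate(s) if c == ']']
--     cu_open = [i for i, c in enumerate(s) if c == '{']
--     cu_close = [i for i, c in enumerate(s) if c == '}']
--
--     square_found = bool(sq_open or sq_close)
--     curly_found = bool(cu_open or cu_close)
--     if square_found and curly_found: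
--         raise ValueError("Both square and curly brackets found")
--
--     if square_found:
--         if len(sq_open) != len(sq_close) or any(o > c for o, c in zip(sq_open, sq_close)):
--             raise ValueError("Invalid square bracket sequence")
--         return s.translate(str.maketrans('[]', '{}'))
--
--     if curly_found:
--         if len(cu_open) != len(cu_close) or any(o > c for o, c in zip(cu_open, cu_close)):
--             raise ValueError("Invalid curly bracket sequence")
--         return s.translate(str.maketrans('{}', '[]'))
--
--     return s
-- ===== Notes on version B (the rewrite author's own statement) =====
-- stated objective: alternative
-- what changed: B validates by a position-pairing criterion — it builds the index lists of each bracket kind and checks that the k-th opening bracket precedes the k-th closing bracket — instead of A's running-counter scan with inline raises, and swaps brackets with one per-character translate table instead of two replace passes.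
import Mathlib
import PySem

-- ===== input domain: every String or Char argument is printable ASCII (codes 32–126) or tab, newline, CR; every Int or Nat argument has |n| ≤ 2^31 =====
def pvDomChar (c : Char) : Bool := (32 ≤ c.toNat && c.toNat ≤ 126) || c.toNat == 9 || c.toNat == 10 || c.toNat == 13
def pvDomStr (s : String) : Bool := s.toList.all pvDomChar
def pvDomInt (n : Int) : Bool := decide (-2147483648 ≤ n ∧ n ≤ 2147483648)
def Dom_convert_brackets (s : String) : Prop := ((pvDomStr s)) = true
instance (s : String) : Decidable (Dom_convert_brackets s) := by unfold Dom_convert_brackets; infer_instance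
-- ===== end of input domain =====

-- B validates brackets by a different algorithm: it collects the index lists of each bracket
-- kind and checks that the k-th opening bracket precedes the k-th closing bracket (position
-- pairing) instead of A's running-counter scan, then swaps with one per-character translation;
-- inputs where A raises ValueError are outside Pre_.


-- ===== PORT A =====
-- A's single loop: four counters, raising (none) the moment a right count exceeds its left.
def convAScan : List Char → Int → Int → Int → Int → Int → Option (Int × Int × Int × Int)
  | [], _, lsq, rsq, lcu, rcu => some (lsq, rsq, lcu, rcu)
  | c :: t, i, lsq, rsq, lcu, rcu =>
    if c = '[' then convAScan t (i + 1) (lsq + 1) rsq lcu rcu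
    else if c = ']' then
      if rsq + 1 > lsq then none  -- ValueError case 1
      else convAScan t (i + 1) lsq (rsq + 1) lcu rcu
    else if c = '{' then convAScan t (i + 1) lsq rsq (lcu + 1) rcu
    else if c = '}' then
      if rcu + 1 > lcu then none  -- ValueError case 1
      else convAScan t (i + 1) lsq rsq lcu (rcu + 1)
    else convAScan t (i + 1) lsq rsq lcu rcu

def convert_brackets (s : String) : String :=
  match convAScan s.toList 0 0 0 0 0 with
  | none => ""  -- raise: excluded by Pre_
  | some (lsq, rsq, lcu, rcu) =>
    let square_found := decide (0 < lsq) || decide (0 < rsq)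
    let curly_found := decide (0 < lcu) || decide (0 < rcu)
    if square_found && curly_found then ""  -- ValueError case 2: excluded by Pre_
    else if square_found && decide (lsq ≠ rsq) then ""  -- ValueError case 3: excluded by Pre_
    else if curly_found && decide (lcu ≠ rcu) then ""  -- ValueError case 3: excluded by Pre_
    else
      let solution := s
      let solution := if square_found then
          PySem.Str.replace (PySem.Str.replace s "[" "{") "]" "}" else solution
      let solution := if curly_found then
          PySem.Str.replace (PySem.Str.replace s "{" "[") "}" "]" else solution
      solution

-- ===== PORT B =====
-- B's helper: [i for i, c in enumerate(s) if c == b]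
def positions (s : String) (b : Char) : List Int :=
  ((PySem.List.enumerate s.toList).filter (fun p => p.2 == b)).map Prod.fst

-- str.translate with a two-entry table = per-code-point swap (exact for such tables)
def translatePair (x y a b : Char) (s : String) : String :=
  String.ofList (s.toList.map (fun c => if c = x then a else if c = y then b else c))

def convert_brackets_alt (s : String) : String :=
  let sq_open := positions s '['
  let sq_close := positions s ']'
  let cu_open := positions s '{'
  let cu_close := positions s '}'
  let square_found := !sq_open.isEmpty || !sq_close.isEmpty
  let curly_found := !cu_open.isEmpty || !cu_close.isEmpty
  if square_found && curly_found then ""  -- raise: excluded by Pre_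
  else if square_found then
    if decide (sq_open.length ≠ sq_close.length)
        || (sq_open.zip sq_close).any (fun p => decide (p.1 > p.2)) then ""  -- raise: excluded by Pre_
    else translatePair '[' ']' '{' '}' s
  else if curly_found then
    if decide (cu_open.length ≠ cu_close.length)
        || (cu_open.zip cu_close).any (fun p => decide (p.1 > p.2)) then ""  -- raise: excluded by Pre_
    else translatePair '{' '}' '[' ']' s
  else s

-- ===== PRECONDITION & SPEC =====
-- Pre_ = exactly the inputs where A returns (no ValueError): no prefix with more right than
-- left brackets of a family, not both families present, and equal left/right totals.
def Pre_convert_brackets (s : String) : Prop :=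
  (∀ i ∈ List.range s.toList.length,
      (s.toList.take (i + 1)).count ']' ≤ (s.toList.take (i + 1)).count '[' ∧
      (s.toList.take (i + 1)).count '}' ≤ (s.toList.take (i + 1)).count '{') ∧
  ¬ ((0 < s.toList.count '[' ∨ 0 < s.toList.count ']') ∧
     (0 < s.toList.count '{' ∨ 0 < s.toList.count '}')) ∧
  s.toList.count '[' = s.toList.count ']' ∧
  s.toList.count '{' = s.toList.count '}'
instance (s : String) : Decidable (Pre_convert_brackets s) := by
  unfold Pre_convert_brackets; infer_instance

def pvWitness_convert_brackets : String := "a[b][c]"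

def Spec_convert_brackets (s : String) (out : String) : Prop := out = convert_brackets_alt s
instance (s : String) (out : String) : Decidable (Spec_convert_brackets s out) := by
  unfold Spec_convert_brackets; infer_instance

-- ===== CLAIM (what is proved, stated in full; the proofs are below) =====
def Claim_equal_convert_brackets : Prop :=
  ∀ (s : String), Dom_convert_brackets s → Pre_convert_brackets s →
    Spec_convert_brackets s (convert_brackets s)

-- ===== LEMMAS AND PROOFS =====

-- A's loop returns the four totals whenever every prefix is right-bounded.
lemma convAScan_eq (l : List Char) (i lsq rsq lcu rcu : Int)
    (h : ∀ p, p <+: l →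
      rsq + (p.count ']' : Int) ≤ lsq + (p.count '[' : Int) ∧
      rcu + (p.count '}' : Int) ≤ lcu + (p.count '{' : Int)) :
    convAScan l i lsq rsq lcu rcu =
      some (lsq + (l.count '[' : Int), rsq + (l.count ']' : Int),
            lcu + (l.count '{' : Int), rcu + (l.count '}' : Int)) := by
  induction l generalizing i lsq rsq lcu rcu with
  | nil => simp [convAScan]
  | cons c t ih =>
    have hc := h [c] ⟨t, rfl⟩
    simp [List.count_cons] at hc
    have hstep : ∀ (p : List Char), p <+: t → (c :: p) <+: (c :: t) := by
      intro p hp; exact List.cons_prefix_cons.mpr ⟨rfl, hp⟩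
    by_cases h1 : c = '['
    · subst h1
      rw [convAScan]; simp only [reduceIte]
      rw [ih (i+1) (lsq+1) rsq lcu rcu ?_]
      · simp [List.count_cons]; omega
      · intro p hp
        have := h _ (hstep p hp)
        simp [List.count_cons] at this
        constructor <;> [omega; omega]
    · by_cases h2 : c = ']'
      · subst h2
        rw [convAScan]; simp only [reduceIte]
        have hle : ¬ (rsq + 1 > lsq) := by simp at hc; omega
        rw [if_neg hle]
        rw [ih (i+1) lsq (rsq+1) lcu rcu ?_]
        · simp [List.count_cons]; omega
        · intro p hp
          have := h _ (hstep p hp)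
          simp [List.count_cons] at this
          constructor <;> [omega; omega]
      · by_cases h3 : c = '{'
        · subst h3
          rw [convAScan]
          simp only [reduceIte]
          rw [ih (i+1) lsq rsq (lcu+1) rcu ?_]
          · simp [List.count_cons]; omega
          · intro p hp
            have := h _ (hstep p hp)
            simp [List.count_cons] at this
            constructor <;> [omega; omega]
        · by_cases h4 : c = '}'
          · subst h4
            rw [convAScan]
            simp only [reduceIte]
            have hle : ¬ (rcu + 1 > lcu) := by simp at hc; omega
            rw [if_neg hle]
            rw [ih (i+1) lsq rsq lcu (rcu+1) ?_]
            · simp [List.count_cons]; omega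
            · intro p hp
              have := h _ (hstep p hp)
              simp [List.count_cons] at this
              constructor <;> [omega; omega]
          · rw [convAScan]
            rw [if_neg h1, if_neg h2, if_neg h3, if_neg h4]
            rw [ih (i+1) lsq rsq lcu rcu ?_]
            · simp [List.count_cons, h1, h2, h3, h4]
            · intro p hp
              have := h _ (hstep p hp)
              simp [List.count_cons, h1, h2, h3, h4] at this
              constructor <;> [omega; omega]

-- proof-side generalization of `positions` with an arbitrary start index
def occGo (b : Char) (l : List Char) (i : Int) : List Int :=
  ((PySem.List.enumerate l i).filter (fun p => p.2 == b)).map Prod.fst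

lemma positions_eq (s : String) (b : Char) : positions s b = occGo b s.toList 0 := rfl

lemma occGo_nil (b : Char) (i : Int) : occGo b [] i = [] := rfl

lemma occGo_cons (b c : Char) (t : List Char) (i : Int) :
    occGo b (c :: t) i = (if c = b then [i] else []) ++ occGo b t (i + 1) := by
  by_cases h : c = b <;>
    simp [occGo, PySem.List.enumerate_cons, List.filter, h]

lemma occGo_length (b : Char) (l : List Char) (i : Int) :
    (occGo b l i).length = l.count b := by
  induction l generalizing i with
  | nil => simp [occGo_nil]
  | cons c t ih =>
    rw [occGo_cons]
    by_cases h : c = b <;> simp [h, List.count_cons, ih] <;> omega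

lemma occGo_ge (b : Char) (l : List Char) (i : Int) :
    ∀ x ∈ occGo b l i, i ≤ x := by
  induction l generalizing i with
  | nil => simp [occGo_nil]
  | cons c t ih =>
    rw [occGo_cons]
    intro x hx
    rcases List.mem_append.mp hx with h1 | h2
    · by_cases h : c = b <;> simp [h] at h1; omega
    · have := ih (i+1) x h2; omega

-- position pairing: with d surplus-open credits, the k-th opener precedes the (k+d)-th closer
lemma occ_pairing (o cl : Char) (hoc : o ≠ cl) (l : List Char) (i : Int) (d k : Nat) (a b : Int)
    (h : ∀ p, p <+: l → (p.count cl : Int) ≤ (d : Int) + p.count o)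
    (ha : (occGo o l i)[k]? = some a) (hb : (occGo cl l i)[k + d]? = some b) :
    a < b := by
  induction l generalizing i d k with
  | nil => simp [occGo_nil] at ha
  | cons c t ih =>
    have hstep : ∀ (p : List Char), p <+: t → (c :: p) <+: (c :: t) := by
      intro p hp; exact List.cons_prefix_cons.mpr ⟨rfl, hp⟩
    by_cases h1 : c = o
    · subst h1
      rw [occGo_cons] at ha hb
      have hne : ¬ (c = cl) := fun hh => hoc (hh ▸ rfl)
      simp only [reduceIte, hne, if_false, List.nil_append] at hb
      have ht : ∀ p, p <+: t → (p.count cl : Int) ≤ ((d + 1 : Nat) : Int) + p.count c := by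
        intro p hp
        have := h _ (hstep p hp)
        simp [List.count_cons, hne] at this
        push_cast
        push_cast at this
        omega
      cases k with
      | zero =>
        simp at ha
        have hbmem : b ∈ occGo cl t (i + 1) := List.mem_of_getElem? hb
        have := occGo_ge cl t (i+1) b hbmem
        omega
      | succ k' =>
        have ha' : (occGo c t (i+1))[k']? = some a := by
          simpa using ha
        have hb' : (occGo cl t (i+1))[k' + (d+1)]? = some b := by
          have hkk : k' + 1 + d = k' + (d + 1) := by omega
          rw [hkk] at hb; exact hb
        exact ih (i+1) (d+1) k' ht ha' hb'
    · by_cases h2 : c = cl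
      · subst h2
        have hd : 1 ≤ d := by
          have := h [c] ⟨t, rfl⟩
          simp [h1] at this
          omega
        obtain ⟨d', rfl⟩ : ∃ d', d = d' + 1 := ⟨d - 1, by omega⟩
        rw [occGo_cons] at ha hb
        simp only [h1, if_false, reduceIte, List.nil_append] at ha hb
        have ht : ∀ p, p <+: t → (p.count c : Int) ≤ ((d' : Nat) : Int) + p.count o := by
          intro p hp
          have := h _ (hstep p hp)
          simp [List.count_cons, h1] at this
          push_cast
          push_cast at this
          omega
        have hb' : (occGo c t (i+1))[k + d']? = some b := by
          have hk : k + (d' + 1) = (k + d') + 1 := by omega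
          rw [hk] at hb
          simpa using hb
        exact ih (i+1) d' k ht ha hb'
      · rw [occGo_cons] at ha hb
        simp only [h1, h2, if_false, List.nil_append] at ha hb
        have ht : ∀ p, p <+: t → (p.count cl : Int) ≤ ((d : Nat) : Int) + p.count o := by
          intro p hp
          have := h _ (hstep p hp)
          simp [List.count_cons, h1, h2] at this
          push_cast
          push_cast at this
          omega
        exact ih (i+1) d k ht ha hb

-- Python's s.replace(c, d) for single characters is a per-character map.
lemma replace_go_single (a b : Char) :
    ∀ (fuel : Nat) (l : List Char) (acc : List Char), l.length ≤ fuel →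
      PySem.Chars.replace.go [a] [b] fuel l acc =
        acc.reverse ++ l.map (fun c => if c = a then b else c)
  | 0, [], acc, _ => by simp [PySem.Chars.replace.go]
  | 0, c :: t, acc, h => by simp at h
  | fuel+1, [], acc, _ => by simp [PySem.Chars.replace.go]
  | fuel+1, c :: t, acc, h => by
    rw [PySem.Chars.replace.go]
    by_cases hc : a = c
    · subst hc
      simp only [List.isPrefixOf, BEq.rfl, Bool.true_and, List.isPrefixOf_nil_left, if_true]
      simp only [List.length_cons, List.length_nil, List.drop_succ_cons, List.drop_zero]
      rw [replace_go_single a b fuel t ([b].reverse ++ acc) (by simpa using h)]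
      simp
    · have hpf : [a].isPrefixOf (c :: t) = false := by
        simp [List.isPrefixOf]; exact hc
      rw [hpf]
      simp only [Bool.false_eq_true, if_false]
      rw [replace_go_single a b fuel t (c :: acc) (by simp at h; omega)]
      have hca : ¬ c = a := fun hh => hc hh.symm
      simp [hca]

lemma chars_replace_single (l : List Char) (a b : Char) :
    PySem.Chars.replace l [a] [b] = l.map (fun c => if c = a then b else c) := by
  rw [PySem.Chars.replace]
  simp [replace_go_single a b l.length l [] le_rfl]

-- A's two square replace passes = B's one translate map.
lemma replace_sq (s : String) :
    PySem.Str.replace (PySem.Str.replace s "[" "{") "]" "}" =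
      translatePair '[' ']' '{' '}' s := by
  apply String.toList_inj.mp
  rw [translatePair, String.toList_ofList, PySem.Str.toList_replace, PySem.Str.toList_replace]
  show PySem.Chars.replace (PySem.Chars.replace s.toList ['['] ['{']) [']'] ['}'] = _
  rw [chars_replace_single, chars_replace_single, List.map_map]
  refine List.map_congr_left ?_
  intro c _
  by_cases h1 : c = '[' <;> by_cases h2 : c = ']' <;>
    simp_all [Function.comp]

-- A's two curly replace passes = B's one translate map.
lemma replace_cu (s : String) :
    PySem.Str.replace (PySem.Str.replace s "{" "[") "}" "]" =
      translatePair '{' '}' '[' ']' s := by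
  apply String.toList_inj.mp
  rw [translatePair, String.toList_ofList, PySem.Str.toList_replace, PySem.Str.toList_replace]
  show PySem.Chars.replace (PySem.Chars.replace s.toList ['{'] ['[']) ['}'] [']'] = _
  rw [chars_replace_single, chars_replace_single, List.map_map]
  refine List.map_congr_left ?_
  intro c _
  by_cases h1 : c = '{' <;> by_cases h2 : c = '}' <;>
    simp_all [Function.comp]

-- the zip-any check of B is false when every prefix is closer-bounded
lemma zip_any_false (o cl : Char) (hoc : o ≠ cl) (l : List Char)
    (h : ∀ p, p <+: l → p.count cl ≤ p.count o) :
    ((occGo o l 0).zip (occGo cl l 0)).any (fun p => decide (p.1 > p.2)) = false := by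
  rw [List.any_eq_false]
  intro x hx
  obtain ⟨k, hk, rfl⟩ := List.mem_iff_getElem.mp hx
  rw [List.getElem_zip]
  simp only [gt_iff_lt, decide_eq_false_iff_not, not_lt]
  have hkl : k < (occGo o l 0).length := by rw [List.length_zip] at hk; omega
  have hkr : k < (occGo cl l 0).length := by rw [List.length_zip] at hk; omega
  have := occ_pairing o cl hoc l 0 0 k ((occGo o l 0)[k]) ((occGo cl l 0)[k])
    (by intro p hp; have := h p hp; push_cast; omega)
    (List.getElem?_eq_getElem hkl)
    (by simpa using List.getElem?_eq_getElem hkr)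
  intro hcon
  exact absurd this (lt_asymm (decide_eq_true_eq.mp hcon))

-- ===== VERDICT (by name: the statement is the Claim_ definition above) =====
theorem convert_brackets_spec : Claim_equal_convert_brackets := by
  unfold Claim_equal_convert_brackets Spec_convert_brackets
  intro s _ hpre
  obtain ⟨hpref, hboth, hsqeq, hcueq⟩ := hpre
  have hall : ∀ p : List Char, p <+: s.toList →
      (p.count ']' ≤ p.count '[' ∧ p.count '}' ≤ p.count '{') := by
    intro p hp
    rcases Nat.eq_zero_or_pos p.length with h0 | h0
    · have hnil : p = [] := List.eq_nil_of_length_eq_zero h0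
      subst hnil; simp
    · have hlen : p.length ≤ s.toList.length := hp.length_le
      have hpl : p = s.toList.take p.length := List.prefix_iff_eq_take.mp hp
      have hi : p.length - 1 < s.toList.length := by omega
      have hx := hpref _ (List.mem_range.mpr hi)
      have he : p.length - 1 + 1 = p.length := by omega
      rw [he] at hx
      rw [hpl]; exact hx
  have hA := convAScan_eq s.toList 0 0 0 0 0 (by
    intro p hp; have := hall p hp
    constructor <;> omega)
  rw [convert_brackets, convert_brackets_alt, hA]
  simp only [zero_add, positions_eq]
  have hl1 : (occGo '[' s.toList 0).length = s.toList.count '[' := occGo_length _ _ _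
  have hl2 : (occGo ']' s.toList 0).length = s.toList.count ']' := occGo_length _ _ _
  have hl3 : (occGo '{' s.toList 0).length = s.toList.count '{' := occGo_length _ _ _
  have hl4 : (occGo '}' s.toList 0).length = s.toList.count '}' := occGo_length _ _ _
  by_cases hS : 0 < s.toList.count '[' ∨ 0 < s.toList.count ']' <;>
    by_cases hC : 0 < s.toList.count '{' ∨ 0 < s.toList.count '}'
  · exact absurd ⟨hS, hC⟩ hboth
  · -- square only
    have hz3 : s.toList.count '{' = 0 := by omega
    have hz4 : s.toList.count '}' = 0 := by omega
    have hsq : 0 < s.toList.count '[' := by omega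
    have e1 : (occGo '[' s.toList 0).isEmpty = false := by
      rw [List.isEmpty_eq_false_iff]; intro he; rw [← List.length_eq_zero_iff] at he; omega
    have e3 : (occGo '{' s.toList 0).isEmpty = true := by
      rw [List.isEmpty_iff, ← List.length_eq_zero_iff]; omega
    have e4 : (occGo '}' s.toList 0).isEmpty = true := by
      rw [List.isEmpty_iff, ← List.length_eq_zero_iff]; omega
    have hany := zip_any_false '[' ']' (by decide) s.toList (fun p hp => (hall p hp).1)
    have hmemL : '[' ∈ s.toList := List.count_pos_iff.mp (by omega)
    have hmemR : ']' ∈ s.toList := List.count_pos_iff.mp (by omega)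
    simp [e1, e3, e4, hl1, hl2, hsq, hz3, hz4, hsqeq, hany, hmemL, hmemR, replace_sq]
  · -- curly only
    have hz1 : s.toList.count '[' = 0 := by omega
    have hz2 : s.toList.count ']' = 0 := by omega
    have hcu : 0 < s.toList.count '{' := by omega
    have e1 : (occGo '[' s.toList 0).isEmpty = true := by
      rw [List.isEmpty_iff, ← List.length_eq_zero_iff]; omega
    have e2 : (occGo ']' s.toList 0).isEmpty = true := by
      rw [List.isEmpty_iff, ← List.length_eq_zero_iff]; omega
    have e3 : (occGo '{' s.toList 0).isEmpty = false := by
      rw [List.isEmpty_eq_false_iff]; intro he; rw [← List.length_eq_zero_iff] at he; omega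
    have hany := zip_any_false '{' '}' (by decide) s.toList (fun p hp => (hall p hp).2)
    have hmemL : '{' ∈ s.toList := List.count_pos_iff.mp (by omega)
    have hmemR : '}' ∈ s.toList := List.count_pos_iff.mp (by omega)
    simp [e1, e2, e3, hl3, hl4, hcu, hz1, hz2, hcueq, hany, hmemL, hmemR, replace_cu]
  · -- no brackets at all
    have hz1 : s.toList.count '[' = 0 := by omega
    have hz2 : s.toList.count ']' = 0 := by omega
    have hz3 : s.toList.count '{' = 0 := by omega
    have hz4 : s.toList.count '}' = 0 := by omega
    have e1 : (occGo '[' s.toList 0).isEmpty = true := by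
      rw [List.isEmpty_iff, ← List.length_eq_zero_iff]; omega
    have e2 : (occGo ']' s.toList 0).isEmpty = true := by
      rw [List.isEmpty_iff, ← List.length_eq_zero_iff]; omega
    have e3 : (occGo '{' s.toList 0).isEmpty = true := by
      rw [List.isEmpty_iff, ← List.length_eq_zero_iff]; omega
    have e4 : (occGo '}' s.toList 0).isEmpty = true := by
      rw [List.isEmpty_iff, ← List.length_eq_zero_iff]; omega
    simp [e1, e2, e3, e4, hz1, hz2, hz3, hz4]
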